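-- pv_equiv track=rewrite | github.com/openanolis/trustee | tools/slsa/audit_reference_value_v2.py | power256_level
-- ===== SOURCE A (Python) =====
-- def power256_level(size: int) -> int:
--     if size < 1:
--         return -1
--     lvl = 0
--     s = size
--     while s > 1 and s % 256 == 0:
--         s //= 256
--         lvl += 1
--     return lvl if s == 1 else -1
-- ===== SOURCE B (Python) =====
-- def power256_level(size: int) -> int:
--     # closed-form: powers of 256 are exactly powers of two whose exponent is divisible by 8
--     if size < 1:
--         return -1
--     k = size.bit_length() - 1
--     if size != 1 << k:
--         return -1
--     return k // 8 if k % 8 == 0 else -1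
-- ===== Notes on version B (the rewrite author's own statement) =====
-- stated objective: simpler
-- what changed: Replaces the iterative divide-by-256 loop with a closed-form bit test: size must equal 1 << (bit_length-1) (a power of two) and the exponent must be divisible by 8.
import Mathlib
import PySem

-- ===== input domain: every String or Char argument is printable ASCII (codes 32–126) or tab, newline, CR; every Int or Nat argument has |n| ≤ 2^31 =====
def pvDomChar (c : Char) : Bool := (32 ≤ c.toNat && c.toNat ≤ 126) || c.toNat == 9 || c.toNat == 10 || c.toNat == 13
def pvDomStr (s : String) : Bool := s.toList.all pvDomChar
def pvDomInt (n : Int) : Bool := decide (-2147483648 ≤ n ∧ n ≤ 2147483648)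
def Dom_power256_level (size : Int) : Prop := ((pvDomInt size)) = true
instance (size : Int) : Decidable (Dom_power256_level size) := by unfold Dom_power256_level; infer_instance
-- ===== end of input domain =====

-- B replaces A's iterative divide-by-256 loop with a closed-form bit test (power of two whose exponent is divisible by 8).

-- ===== PORT A =====
-- the while loop of A: 'while s > 1 and s % 256 == 0: s //= 256; lvl += 1'
def powLoop (s : Int) (lvl : Int) : Int :=
  if h : 1 < s ∧ PySem.Int.mod s 256 = 0 then
    powLoop (PySem.Int.floordiv s 256) (lvl + 1)
  else if s = 1 then lvl else -1
termination_by s.toNat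
decreasing_by
  rw [PySem.Int.floordiv_eq_ediv_of_pos (by norm_num : (0:Int) < 256)]
  obtain ⟨n, hn⟩ : ∃ n : Nat, s = (n : Int) := ⟨s.toNat, by omega⟩
  subst hn
  have h2 : ((n : Int) / 256) = ((n / 256 : Nat) : Int) := by push_cast; rfl
  rw [h2, Int.toNat_natCast, Int.toNat_natCast]
  have _h3 : 1 < n := by exact_mod_cast h.1
  exact Nat.div_lt_self (by omega) (by norm_num)

def power256_level (size : Int) : Int :=
  if size < 1 then -1
  else powLoop size 0

-- ===== PORT B =====
def power256_level_alt (size : Int) : Int :=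
  if size < 1 then -1
  else
    -- k = size.bit_length() - 1  (a Nat: size ≥ 1 ⇒ bit_length ≥ 1, so the Nat subtraction is exact)
    let k : Nat := PySem.Int.bitLength size - 1
    if size ≠ (1 : Int) <<< k then -1       -- size != 1 << k
    else if k % 8 = 0 then ((k / 8 : Nat) : Int) else -1

-- ===== PRECONDITION & SPEC =====
def Spec_power256_level (size : Int) (out : Int) : Prop := out = power256_level_alt size
instance (size : Int) (out : Int) : Decidable (Spec_power256_level size out) := by unfold Spec_power256_level; infer_instance

-- ===== CLAIM (what is proved, stated in full; the proofs are below) =====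
def Claim_equal_power256_level : Prop := ∀ (size : Int), Dom_power256_level size → Spec_power256_level size (power256_level size)

-- ===== LEMMAS AND PROOFS =====

lemma bitLength_two_pow (t : Nat) : PySem.Int.bitLength ((2 ^ t : Nat) : Int) = t + 1 := by
  induction t with
  | zero => decide
  | succ t ih =>
      have h : (2 ^ (t+1) : Nat) / 2 = 2 ^ t := by
        rw [pow_succ]; omega
      rw [PySem.Int.bitLength_natCast (by positivity), h, ih]

lemma one_shiftLeft_int (k : Nat) : ((1 : Int) <<< k) = ((2 ^ k : Nat) : Int) := by
  rw [Int.shiftLeft_eq]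
  push_cast
  ring

lemma pow256_eq_two_pow (j : Nat) : (256 : Nat) ^ j = 2 ^ (8 * j) := by
  rw [pow_mul]; norm_num

-- B on a power of 256 returns the exponent
lemma alt_pow (j : Nat) : power256_level_alt ((256 ^ j : Nat) : Int) = j := by
  have h1 : (1:Nat) ≤ 256 ^ j := Nat.one_le_pow _ _ (by norm_num)
  have hlt : ¬ ((256 ^ j : Nat) : Int) < 1 := by exact_mod_cast Nat.not_lt.mpr h1
  have hbl : PySem.Int.bitLength ((256 ^ j : Nat) : Int) = 8 * j + 1 := by
    rw [pow256_eq_two_pow, bitLength_two_pow]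
  have hsh : ((256 ^ j : Nat) : Int) = (1 : Int) <<< (8 * j) := by
    rw [one_shiftLeft_int, pow256_eq_two_pow]
  simp only [power256_level_alt, hlt, if_false]
  simp only [hbl, Nat.add_sub_cancel]
  rw [if_neg (by simp [hsh]), if_pos (Nat.mul_mod_right 8 j)]
  simp [Nat.mul_div_cancel_left j (by norm_num : (0:Nat) < 8)]

-- B on a non-power of 256 returns -1
lemma alt_notpow (n : Nat) (h1 : 1 ≤ n) (h : ∀ j : Nat, n ≠ 256 ^ j) :
    power256_level_alt (n : Int) = -1 := by
  have hlt : ¬ ((n : Nat) : Int) < 1 := by exact_mod_cast Nat.not_lt.mpr h1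
  simp only [power256_level_alt, hlt, if_false]
  set k : Nat := PySem.Int.bitLength (n : Int) - 1 with hk
  by_cases he : (n : Int) = (1 : Int) <<< k
  · have hn2 : n = 2 ^ k := by
      rw [one_shiftLeft_int] at he
      exact_mod_cast he
    by_cases hm : k % 8 = 0
    · exfalso
      apply h (k / 8)
      rw [pow256_eq_two_pow, hn2, Nat.mul_div_cancel' (Nat.dvd_of_mod_eq_zero hm)]
    · simp [he, hm]
  · simp [he]

-- A's loop on a power of 256 counts the exponent
lemma powLoop_pow (j : Nat) (lvl : Int) : powLoop ((256 ^ j : Nat) : Int) lvl = lvl + j := by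
  induction j generalizing lvl with
  | zero =>
      rw [powLoop]
      norm_num
  | succ j ih =>
      have hgt : (1 : Int) < ((256 ^ (j+1) : Nat) : Int) := by
        have : (256:Nat) ≤ 256 ^ (j+1) := Nat.le_self_pow (by omega) _
        exact_mod_cast by omega
      have hdvd : (256 : Int) ∣ ((256 ^ (j+1) : Nat) : Int) := by
        push_cast
        exact dvd_pow_self _ (by omega)
      have hmod : PySem.Int.mod ((256 ^ (j+1) : Nat) : Int) 256 = 0 :=
        (PySem.Int.mod_eq_zero_iff_dvd _ _).mpr hdvd
      have hdiv : PySem.Int.floordiv ((256 ^ (j+1) : Nat) : Int) 256 = ((256 ^ j : Nat) : Int) := by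
        rw [PySem.Int.floordiv_eq_ediv_of_pos (by norm_num : (0:Int) < 256)]
        push_cast
        rw [pow_succ]
        exact Int.mul_ediv_cancel _ (by norm_num)
      rw [powLoop, dif_pos ⟨hgt, hmod⟩, hdiv, ih]
      push_cast
      ring

-- A's loop on a non-power of 256 returns -1
lemma powLoop_notpow (n : Nat) (h1 : 1 ≤ n) (h : ∀ j : Nat, n ≠ 256 ^ j) (lvl : Int) :
    powLoop (n : Int) lvl = -1 := by
  induction n using Nat.strong_induction_on generalizing lvl with
  | _ n ih =>
    have hne1 : n ≠ 1 := by intro he; exact h 0 (by simpa using he)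
    by_cases hc : 1 < (n : Int) ∧ PySem.Int.mod (n : Int) 256 = 0
    · have hdvd : (256 : Nat) ∣ n := by
        have := (PySem.Int.mod_eq_zero_iff_dvd _ _).mp hc.2
        exact_mod_cast this
      obtain ⟨m, rfl⟩ := hdvd
      have hn1 : 1 < 256 * m := by exact_mod_cast hc.1
      have hm1 : 1 ≤ m := by omega
      have hdiv : PySem.Int.floordiv ((256 * m : Nat) : Int) 256 = (m : Int) := by
        rw [PySem.Int.floordiv_eq_ediv_of_pos (by norm_num : (0:Int) < 256)]
        push_cast
        exact Int.mul_ediv_cancel_left _ (by norm_num)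
      have hmnp : ∀ j : Nat, m ≠ 256 ^ j := by
        intro j he
        exact h (j + 1) (by rw [he, pow_succ]; ring)
      rw [powLoop, dif_pos hc, hdiv]
      exact ih m (by omega) hm1 hmnp _
    · rw [powLoop, dif_neg hc, if_neg (by exact_mod_cast hne1)]

-- ===== VERDICT (by name: the statement is the Claim_ definition above) =====
theorem power256_level_spec : Claim_equal_power256_level := by
  intro size _
  unfold Spec_power256_level power256_level
  by_cases hlt : size < 1
  · simp [hlt, power256_level_alt]
  · simp only [hlt, if_false]
    have h1 : 1 ≤ size := by omega
    obtain ⟨n, rfl⟩ : ∃ n : Nat, size = (n : Int) := ⟨size.toNat, by omega⟩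
    have hn : 1 ≤ n := by exact_mod_cast h1
    by_cases hp : ∃ j : Nat, n = 256 ^ j
    · obtain ⟨j, rfl⟩ := hp
      rw [powLoop_pow, alt_pow]
      ring
    · rw [not_exists] at hp
      rw [powLoop_notpow n hn hp, alt_notpow n hn hp]
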